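-- pv_equiv track=rewrite | github.com/posl/comment_recommendation | script/split_gen/5_time/zh/256_C/2.py | solve
-- ===== SOURCE A (Python) =====
-- def solve(h1,h2,h3,w1,w2,w3):
--     ans = 0
--     for i in range(1,10):
--         for j in range(1,10):
--             for k in range(1,10):
--                 for l in range(1,10):
--                     for m in range(1,10):
--                         for n in range(1,10):
--                             if i + j + k == h1 and l + m + n == h2 and i + l == w1 and j + m == w2 and k + n == w3 and i + j + k == h1 and l + m + n == h2 and i + l == w1 and j + m == w2 and k + n == w3:
--                                 ans += 1
--     return ans
-- ===== SOURCE B (Python) =====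
-- def solve(h1, h2, h3, w1, w2, w3):
--     ans = 0
--     for i in range(1, 10):
--         for j in range(1, 10):
--             k = h1 - i - j
--             l = w1 - i
--             m = w2 - j
--             n = w3 - k
--             if 1 <= k <= 9 and 1 <= l <= 9 and 1 <= m <= 9 and 1 <= n <= 9 and l + m + n == h2:
--                 ans += 1
--     return ans
-- ===== Notes on version B (the rewrite author's own statement) =====
-- stated objective: faster
-- what changed: Instead of brute-forcing all 9^6 digit tuples, B iterates only the two free variables i,j and derives k,l,m,n from the linear row/column constraints, validating ranges and the remaining sum.
import Mathlib
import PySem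

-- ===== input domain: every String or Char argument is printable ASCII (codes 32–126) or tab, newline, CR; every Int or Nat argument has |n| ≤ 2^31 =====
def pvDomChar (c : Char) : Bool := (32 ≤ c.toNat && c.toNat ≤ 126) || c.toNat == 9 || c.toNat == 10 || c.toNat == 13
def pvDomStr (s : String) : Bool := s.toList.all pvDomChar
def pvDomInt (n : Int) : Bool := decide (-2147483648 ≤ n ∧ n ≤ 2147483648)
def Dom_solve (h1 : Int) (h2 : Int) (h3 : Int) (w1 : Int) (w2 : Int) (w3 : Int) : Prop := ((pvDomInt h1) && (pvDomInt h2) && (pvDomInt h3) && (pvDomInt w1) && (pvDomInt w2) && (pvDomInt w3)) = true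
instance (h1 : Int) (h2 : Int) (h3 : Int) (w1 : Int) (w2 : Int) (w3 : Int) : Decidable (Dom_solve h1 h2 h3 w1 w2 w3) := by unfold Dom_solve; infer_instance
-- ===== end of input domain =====

-- B replaces A's brute force over all 9^6 digit tuples by iterating only the two free
-- variables i,j and deriving k,l,m,n from the linear constraints (objective: faster).

-- ===== PORT A =====
def solve (h1 : Int) (h2 : Int) (h3 : Int) (w1 : Int) (w2 : Int) (w3 : Int) : Int :=
  (PySem.List.pyRange 1 10 1).foldl (fun ans i =>
    (PySem.List.pyRange 1 10 1).foldl (fun ans j =>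
      (PySem.List.pyRange 1 10 1).foldl (fun ans k =>
        (PySem.List.pyRange 1 10 1).foldl (fun ans l =>
          (PySem.List.pyRange 1 10 1).foldl (fun ans m =>
            (PySem.List.pyRange 1 10 1).foldl (fun ans n =>
              if i + j + k = h1 ∧ l + m + n = h2 ∧ i + l = w1 ∧ j + m = w2 ∧ k + n = w3 ∧
                 i + j + k = h1 ∧ l + m + n = h2 ∧ i + l = w1 ∧ j + m = w2 ∧ k + n = w3
              then ans + 1 else ans) ans) ans) ans) ans) ans) 0

-- ===== PORT B =====
def solve_alt (h1 : Int) (h2 : Int) (h3 : Int) (w1 : Int) (w2 : Int) (w3 : Int) : Int :=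
  (PySem.List.pyRange 1 10 1).foldl (fun ans i =>
    (PySem.List.pyRange 1 10 1).foldl (fun ans j =>
      let k := h1 - i - j
      let l := w1 - i
      let m := w2 - j
      let n := w3 - k
      if 1 ≤ k ∧ k ≤ 9 ∧ 1 ≤ l ∧ l ≤ 9 ∧ 1 ≤ m ∧ m ≤ 9 ∧ 1 ≤ n ∧ n ≤ 9 ∧ l + m + n = h2
      then ans + 1 else ans) ans) 0

-- ===== PRECONDITION & SPEC =====
def Spec_solve (h1 : Int) (h2 : Int) (h3 : Int) (w1 : Int) (w2 : Int) (w3 : Int) (out : Int) : Prop := out = solve_alt h1 h2 h3 w1 w2 w3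
instance (h1 : Int) (h2 : Int) (h3 : Int) (w1 : Int) (w2 : Int) (w3 : Int) (out : Int) : Decidable (Spec_solve h1 h2 h3 w1 w2 w3 out) := by unfold Spec_solve; infer_instance

-- ===== CLAIM (what is proved, stated in full; the proofs are below) =====
def Claim_equal_solve : Prop := ∀ (h1 : Int) (h2 : Int) (h3 : Int) (w1 : Int) (w2 : Int) (w3 : Int), Dom_solve h1 h2 h3 w1 w2 w3 → Spec_solve h1 h2 h3 w1 w2 w3 (solve h1 h2 h3 w1 w2 w3)

-- ===== LEMMAS AND PROOFS =====

lemma pvRange19 : PySem.List.pyRange 1 10 1 = [1,2,3,4,5,6,7,8,9] := by decide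

-- a fold whose body only ADDS something depending on the element can be started at 0
lemma pvFoldShift (F : Int → Int) (L : List Int) (s : Int) :
    L.foldl (fun a t => a + F t) s = s + L.foldl (fun a t => a + F t) 0 := by
  induction L generalizing s with
  | nil => simp
  | cons t ts ih =>
    simp only [List.foldl_cons]
    rw [ih (s + F t), ih (0 + F t)]
    ring

lemma pvFoldShape (G : Int → Int → Int) (F : Int → Int) (hG : ∀ s t, G s t = s + F t)
    (L : List Int) (s : Int) :
    L.foldl G s = s + L.foldl (fun a t => a + F t) 0 := by
  induction L generalizing s with
  | nil => simp
  | cons t ts ih =>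
    simp only [List.foldl_cons, hG]
    rw [ih (s + F t), pvFoldShift F ts (0 + F t)]
    ring

lemma pvFoldlCongr (L : List Int) (f g : Int → Int → Int) (h : ∀ a t, f a t = g a t)
    (s : Int) : L.foldl f s = L.foldl g s := by
  induction L generalizing s with
  | nil => rfl
  | cons t ts ih =>
    simp only [List.foldl_cons, h]
    exact ih (g s t)

-- a 0/1 fold over [1..9] whose summand vanishes off t = c collapses to a single guarded term
lemma pvCollapse (c : Int) (g : Int → Int) (h0 : ∀ t, t ≠ c → g t = 0) :
    List.foldl (fun a t => a + g t) (0 : Int) [1,2,3,4,5,6,7,8,9]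
      = if 1 ≤ c ∧ c ≤ 9 then g c else 0 := by
  have e : ∀ t : Int, g t = if t = c then g c else 0 := by
    intro t
    by_cases ht : t = c
    · subst ht; simp
    · simp [ht, h0 t ht]
  simp only [List.foldl_cons, List.foldl_nil]
  rw [e 1, e 2, e 3, e 4, e 5, e 6, e 7, e 8, e 9]
  split_ifs <;> omega

-- the four inner loops of A, for fixed i and j, collapse to B's single test
lemma pvInner (h1 h2 w1 w2 w3 i j s : Int) :
    List.foldl (fun ans k =>
      List.foldl (fun ans l =>
        List.foldl (fun ans m =>
          List.foldl (fun ans n =>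
            if i + j + k = h1 ∧ l + m + n = h2 ∧ i + l = w1 ∧ j + m = w2 ∧ k + n = w3 ∧
               i + j + k = h1 ∧ l + m + n = h2 ∧ i + l = w1 ∧ j + m = w2 ∧ k + n = w3
            then ans + 1 else ans) ans [1,2,3,4,5,6,7,8,9]) ans [1,2,3,4,5,6,7,8,9])
        ans [1,2,3,4,5,6,7,8,9]) s [1,2,3,4,5,6,7,8,9]
    = s + (if 1 ≤ h1 - i - j ∧ h1 - i - j ≤ 9 ∧ 1 ≤ w1 - i ∧ w1 - i ≤ 9 ∧
              1 ≤ w2 - j ∧ w2 - j ≤ 9 ∧ 1 ≤ w3 - (h1 - i - j) ∧ w3 - (h1 - i - j) ≤ 9 ∧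
              (w1 - i) + (w2 - j) + (w3 - (h1 - i - j)) = h2
           then 1 else 0) := by
  -- collapse n
  have hn : ∀ (k l m s : Int),
      List.foldl (fun ans n =>
        if i + j + k = h1 ∧ l + m + n = h2 ∧ i + l = w1 ∧ j + m = w2 ∧ k + n = w3 ∧
           i + j + k = h1 ∧ l + m + n = h2 ∧ i + l = w1 ∧ j + m = w2 ∧ k + n = w3
        then ans + 1 else ans) s [1,2,3,4,5,6,7,8,9]
      = s + (if 1 ≤ h2 - l - m ∧ h2 - l - m ≤ 9 ∧ i + j + k = h1 ∧ i + l = w1 ∧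
                j + m = w2 ∧ k + (h2 - l - m) = w3 then 1 else 0) := by
    intro k l m s
    rw [pvFoldShape _
      (fun n => if i + j + k = h1 ∧ l + m + n = h2 ∧ i + l = w1 ∧ j + m = w2 ∧ k + n = w3 ∧
           i + j + k = h1 ∧ l + m + n = h2 ∧ i + l = w1 ∧ j + m = w2 ∧ k + n = w3
           then 1 else 0)
      (by intro s t; dsimp only; split_ifs <;> omega)]
    rw [pvCollapse (h2 - l - m) _ (by intro t ht; split_ifs <;> omega)]
    congr 1
    split_ifs <;> omega
  -- collapse m
  have hm : ∀ (k l s : Int),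
      List.foldl (fun ans m =>
        List.foldl (fun ans n =>
          if i + j + k = h1 ∧ l + m + n = h2 ∧ i + l = w1 ∧ j + m = w2 ∧ k + n = w3 ∧
             i + j + k = h1 ∧ l + m + n = h2 ∧ i + l = w1 ∧ j + m = w2 ∧ k + n = w3
          then ans + 1 else ans) ans [1,2,3,4,5,6,7,8,9]) s [1,2,3,4,5,6,7,8,9]
      = s + (if 1 ≤ w2 - j ∧ w2 - j ≤ 9 ∧ 1 ≤ h2 - l - (w2 - j) ∧ h2 - l - (w2 - j) ≤ 9 ∧
                i + j + k = h1 ∧ i + l = w1 ∧ k + (h2 - l - (w2 - j)) = w3 then 1 else 0) := by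
    intro k l s
    rw [pvFoldShape _
      (fun m => if 1 ≤ h2 - l - m ∧ h2 - l - m ≤ 9 ∧ i + j + k = h1 ∧ i + l = w1 ∧
                j + m = w2 ∧ k + (h2 - l - m) = w3 then 1 else 0)
      (by intro s t; rw [hn])]
    rw [pvCollapse (w2 - j) _ (by intro t ht; split_ifs <;> omega)]
    congr 1
    split_ifs <;> omega
  -- collapse l
  have hl : ∀ (k s : Int),
      List.foldl (fun ans l =>
        List.foldl (fun ans m =>
          List.foldl (fun ans n =>
            if i + j + k = h1 ∧ l + m + n = h2 ∧ i + l = w1 ∧ j + m = w2 ∧ k + n = w3 ∧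
               i + j + k = h1 ∧ l + m + n = h2 ∧ i + l = w1 ∧ j + m = w2 ∧ k + n = w3
            then ans + 1 else ans) ans [1,2,3,4,5,6,7,8,9]) ans [1,2,3,4,5,6,7,8,9])
        s [1,2,3,4,5,6,7,8,9]
      = s + (if 1 ≤ w1 - i ∧ w1 - i ≤ 9 ∧ 1 ≤ w2 - j ∧ w2 - j ≤ 9 ∧
                1 ≤ h2 - (w1 - i) - (w2 - j) ∧ h2 - (w1 - i) - (w2 - j) ≤ 9 ∧
                i + j + k = h1 ∧ k + (h2 - (w1 - i) - (w2 - j)) = w3 then 1 else 0) := by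
    intro k s
    rw [pvFoldShape _
      (fun l => if 1 ≤ w2 - j ∧ w2 - j ≤ 9 ∧ 1 ≤ h2 - l - (w2 - j) ∧ h2 - l - (w2 - j) ≤ 9 ∧
                i + j + k = h1 ∧ i + l = w1 ∧ k + (h2 - l - (w2 - j)) = w3 then 1 else 0)
      (by intro s t; rw [hm])]
    rw [pvCollapse (w1 - i) _ (by intro t ht; split_ifs <;> omega)]
    congr 1
    split_ifs <;> omega
  -- collapse k
  rw [pvFoldShape _
    (fun k => if 1 ≤ w1 - i ∧ w1 - i ≤ 9 ∧ 1 ≤ w2 - j ∧ w2 - j ≤ 9 ∧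
                1 ≤ h2 - (w1 - i) - (w2 - j) ∧ h2 - (w1 - i) - (w2 - j) ≤ 9 ∧
                i + j + k = h1 ∧ k + (h2 - (w1 - i) - (w2 - j)) = w3 then 1 else 0)
    (by intro s t; rw [hl])]
  rw [pvCollapse (h1 - i - j) _ (by intro t ht; split_ifs <;> omega)]
  congr 1
  split_ifs <;> omega

-- ===== VERDICT (by name: the statement is the Claim_ definition above) =====
theorem solve_spec : Claim_equal_solve := by
  intro h1 h2 h3 w1 w2 w3 _
  unfold Spec_solve solve solve_alt
  rw [pvRange19]
  -- equate the two j-loop bodies pointwise, then the i-loops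
  have hj : ∀ i s : Int,
      List.foldl (fun ans j =>
        List.foldl (fun ans k =>
          List.foldl (fun ans l =>
            List.foldl (fun ans m =>
              List.foldl (fun ans n =>
                if i + j + k = h1 ∧ l + m + n = h2 ∧ i + l = w1 ∧ j + m = w2 ∧ k + n = w3 ∧
                   i + j + k = h1 ∧ l + m + n = h2 ∧ i + l = w1 ∧ j + m = w2 ∧ k + n = w3
                then ans + 1 else ans) ans [1,2,3,4,5,6,7,8,9]) ans [1,2,3,4,5,6,7,8,9])
            ans [1,2,3,4,5,6,7,8,9]) ans [1,2,3,4,5,6,7,8,9]) s [1,2,3,4,5,6,7,8,9]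
      = List.foldl (fun ans j =>
          let k := h1 - i - j
          let l := w1 - i
          let m := w2 - j
          let n := w3 - k
          if 1 ≤ k ∧ k ≤ 9 ∧ 1 ≤ l ∧ l ≤ 9 ∧ 1 ≤ m ∧ m ≤ 9 ∧ 1 ≤ n ∧ n ≤ 9 ∧ l + m + n = h2
          then ans + 1 else ans) s [1,2,3,4,5,6,7,8,9] := by
    intro i s
    apply pvFoldlCongr
    intro a j
    rw [pvInner]
    simp only []
    split_ifs <;> omega
  apply pvFoldlCongr
  intro a i
  exact hj i a
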